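-- pv_equiv track=rewrite | github.com/yuhuiwang0801/203C-Data-Science-in-Python | hw1/HW1-student/HW1.py | get_triangular_numbers
-- ===== SOURCE A (Python) =====
-- def get_triangular_numbers(k):
--     ''' WRITE YOUR OWN DOCSTRING HERE
--     Generates a list of the first 'k' triangular numbers.
--
--     Args:
--         k (int): The number of triangular numbers to generate.
--
--     Returns:
--         list: A list containing the first 'k' triangular numbers.
--     '''
--     l = []
--     for i in range(1, k+1):
--         n = 0
--         for j in range(1, i+1):
--             n += j
--         l.append(n)
--     return l
-- ===== SOURCE B (Python) =====
-- def get_triangular_numbers(k):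
--     '''First k triangular numbers in one pass: a running sum t is extended by i
--     each step (no inner summation loop re-computing 1+...+i).'''
--     res = []
--     t = 0
--     i = 1
--     while i <= k:
--         t += i
--         res.append(t)
--         i += 1
--     return res
-- ===== Notes on version B (the rewrite author's own statement) =====
-- stated objective: faster
-- what changed: Replaces the nested re-summation (inner loop recomputing 1+...+i for every i) by a single pass with a running sum t += i, appending t each step.
import Mathlib
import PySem

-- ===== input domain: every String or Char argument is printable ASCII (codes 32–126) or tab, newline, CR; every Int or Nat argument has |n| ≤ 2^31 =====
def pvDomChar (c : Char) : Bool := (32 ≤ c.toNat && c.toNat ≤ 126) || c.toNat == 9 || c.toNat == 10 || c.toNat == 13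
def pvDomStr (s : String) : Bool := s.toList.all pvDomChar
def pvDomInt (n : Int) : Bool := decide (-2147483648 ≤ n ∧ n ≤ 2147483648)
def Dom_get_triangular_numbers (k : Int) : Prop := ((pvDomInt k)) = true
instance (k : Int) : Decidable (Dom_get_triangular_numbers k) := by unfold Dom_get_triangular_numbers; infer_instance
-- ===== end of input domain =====

-- ===== PORT A =====
-- Literal port of A: outer loop over range(1,k+1), inner loop summing 1..i, appending.
def get_triangular_numbers (k : Int) : List Int :=
  (PySem.List.pyRange 1 (k + 1) 1).foldl
    (fun l i =>
      l ++ [(PySem.List.pyRange 1 (i + 1) 1).foldl (fun n j => n + j) 0]) []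

-- ===== PORT B =====
-- Port of B: the while loop as tail recursion over the state (res, t, i).
def pvLoopB (k : Int) (res : List Int) (t i : Int) : List Int :=
  if i ≤ k then
    pvLoopB k (res ++ [t + i]) (t + i) (i + 1)
  else res
  termination_by (k + 1 - i).toNat
  decreasing_by omega

def get_triangular_numbers_alt (k : Int) : List Int := pvLoopB k [] 0 1

-- ===== PRECONDITION & SPEC =====
def Spec_get_triangular_numbers (k : Int) (out : List Int) : Prop := out = get_triangular_numbers_alt k
instance (k : Int) (out : List Int) : Decidable (Spec_get_triangular_numbers k out) := by unfold Spec_get_triangular_numbers; infer_instance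

-- ===== CLAIM =====
def Claim_equal_get_triangular_numbers : Prop := ∀ (k : Int), Dom_get_triangular_numbers k → Spec_get_triangular_numbers k (get_triangular_numbers k)

-- ===== LEMMAS AND PROOFS =====
-- A's inner sum of 1..i equals the running triangular value.
def pvTri (i : Int) : Int := (PySem.List.pyRange 1 (i + 1) 1).foldl (fun n j => n + j) 0

lemma pvTri_succ (i : Int) (h : 0 ≤ i) : pvTri (i + 1) = pvTri i + (i + 1) := by
  unfold pvTri
  rw [PySem.List.pyRange_one_succ_right (by omega : (1 : Int) ≤ i + 1), List.foldl_append]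
  simp

lemma pv_foldl_append (xs : List Int) (acc : List Int) (f : Int → Int) :
    xs.foldl (fun l i => l ++ [f i]) acc = acc ++ xs.map f := by
  induction xs generalizing acc with
  | nil => simp
  | cons x xs ih => simp [List.foldl, ih]

-- B's loop, entered with the triangular value below i, appends A's map over the rest.
lemma pvLoopB_eq (k : Int) : ∀ (i : Int), 1 ≤ i → ∀ (res : List Int),
    pvLoopB k res (pvTri (i - 1)) i = res ++ (PySem.List.pyRange i (k + 1) 1).map pvTri := by
  intro i
  induction hn : (k + 1 - i).toNat generalizing i with
  | zero =>
      intro hi res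
      rw [pvLoopB, PySem.List.pyRange_one_eq_nil (by omega)]
      simp only [List.map_nil, List.append_nil]
      rw [if_neg (by omega : ¬ i ≤ k)]
  | succ n ih =>
      intro hi res
      rw [pvLoopB, PySem.List.pyRange_one_cons (by omega : i < k + 1)]
      rw [if_pos (by omega : i ≤ k)]
      have ht : pvTri (i - 1) + i = pvTri i := by
        have := pvTri_succ (i - 1) (by omega)
        simp only [show i - 1 + 1 = i from by omega] at this
        omega
      rw [ht]
      have := ih (i + 1) (by omega) (by omega) (res ++ [pvTri i])
      simp only [show i + 1 - 1 = i from by omega] at this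
      rw [this, List.map_cons, List.append_assoc, List.singleton_append]

-- ===== VERDICT =====
theorem get_triangular_numbers_spec : Claim_equal_get_triangular_numbers := by
  intro k _
  unfold Spec_get_triangular_numbers get_triangular_numbers get_triangular_numbers_alt
  simp only [show ∀ (i : Int), List.foldl (fun n j => n + j) 0 (PySem.List.pyRange 1 (i + 1)) = pvTri i from fun _ => rfl]
  rw [pv_foldl_append _ _ pvTri]
  have := pvLoopB_eq k 1 (by norm_num) []
  simp only [show (1 : Int) - 1 = 0 from rfl, List.nil_append] at this
  rw [List.nil_append]
  exact this.symm
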